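-- pv_equiv track=rewrite | github.com/wwaawwaaee/Mind-Echo | processed_data/build_dataset_adult.py | _split_visits
-- ===== SOURCE A (Python) =====
-- def _split_visits(content: str):
--     lines = content.splitlines()
--     segments = []
--     current = []
--     for line in lines:
--         stripped = line.strip()
--         if (stripped.startswith("（") and stripped.endswith("）")) or (
--             stripped.startswith("(") and stripped.endswith(")")
--         ):
--             if current:
--                 segments.append("\n".join(current).strip())
--                 current = []
--             continue
--         current.append(line)
--     if current:
--         segments.append("\n".join(current).strip())
--     return [s for s in segments if s]
-- ===== SOURCE B (Python) =====
-- def _is_marker(line):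
--     stripped = line.strip()
--     return (stripped.startswith("（") and stripped.endswith("）")) or (
--         stripped.startswith("(") and stripped.endswith(")")
--     )
--
--
-- def _split_visits(content: str):
--     lines = content.splitlines()
--     segs = []
--     pos = 0
--     n = len(lines)
--     while pos < n:
--         if _is_marker(lines[pos]):
--             pos += 1
--         else:
--             end = pos + 1
--             while end < n and not _is_marker(lines[end]):
--                 end += 1
--             seg = "\n".join(lines[pos:end]).strip()
--             if seg:
--                 segs.append(seg)
--             pos = end
--     return segs
-- ===== Notes on version B (the rewrite author's own statement) =====
-- stated objective: alternative
-- what changed: Replaced the accumulator-and-flush loop (pending 'current' list flushed on each marker and once after the loop, then a trailing emptiness filter) by a run-scanner: advance past marker lines, extract each maximal non-marker run with an inner scan, join/strip it and keep it only if non-empty, with no pending state and no final filter pass.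
import Mathlib
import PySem

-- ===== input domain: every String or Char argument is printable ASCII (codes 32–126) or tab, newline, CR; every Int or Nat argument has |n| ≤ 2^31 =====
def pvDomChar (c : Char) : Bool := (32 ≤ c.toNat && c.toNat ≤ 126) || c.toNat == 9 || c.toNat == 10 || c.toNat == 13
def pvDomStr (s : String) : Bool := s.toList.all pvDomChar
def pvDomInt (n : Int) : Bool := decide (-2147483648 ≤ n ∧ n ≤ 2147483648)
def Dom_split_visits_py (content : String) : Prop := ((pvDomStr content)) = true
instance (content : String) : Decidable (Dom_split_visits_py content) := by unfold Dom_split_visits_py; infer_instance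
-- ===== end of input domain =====

-- B replaces A's pending-accumulator loop (flush on marker, flush after the loop, filter at the end)
-- by a run-scanner that extracts each maximal non-marker run directly; same result, similar cost.

-- ===== PORT A =====
-- the marker test performed inline on each stripped line (both implementations do this test)
def pvIsMarker (line : String) : Bool :=
  let stripped := PySem.Str.strip line
  (PySem.Str.startswith stripped "（" && PySem.Str.endswith stripped "）") ||
  (PySem.Str.startswith stripped "(" && PySem.Str.endswith stripped ")")

-- A's loop body on the state (segments, current)
def pvStepA (st : List String × List String) (line : String) : List String × List String :=
  if pvIsMarker line then
    if st.2 ≠ [] then (st.1 ++ [PySem.Str.strip (PySem.Str.join "\n" st.2)], []) else st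
  else (st.1, st.2 ++ [line])

-- A's trailing 'if current: segments.append(...)'
def pvFinishA (st : List String × List String) : List String :=
  if st.2 ≠ [] then st.1 ++ [PySem.Str.strip (PySem.Str.join "\n" st.2)] else st.1

def split_visits_py (content : String) : List String :=
  (pvFinishA ((PySem.Str.splitlines content).foldl pvStepA ([], []))).filter (fun s => s ≠ "")

-- ===== PORT B =====
-- Source B's while loop over positions pos/end becomes the obvious recursion over the suffix
-- lines[pos:]; the inner scan to 'end' is takeWhile/dropWhile of the non-marker run
def pvAltGo (lines : List String) : List String :=
  match lines with
  | [] => []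
  | l :: ls =>
    if pvIsMarker l then pvAltGo ls
    else
      let run := l :: ls.takeWhile (fun x => !pvIsMarker x)   -- lines[pos:end]
      let seg := PySem.Str.strip (PySem.Str.join "\n" run)
      (if seg = "" then [] else [seg]) ++ pvAltGo (ls.dropWhile (fun x => !pvIsMarker x))
termination_by lines.length
decreasing_by
  · simp only [List.length_cons]; omega
  · have h := List.length_dropWhile_le (fun x => !pvIsMarker x) ls
    simp only [List.length_cons]; omega

def split_visits_py_alt (content : String) : List String :=
  pvAltGo (PySem.Str.splitlines content)

-- ===== PRECONDITION & SPEC =====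
def Spec_split_visits_py (content : String) (out : List String) : Prop := out = split_visits_py_alt content
instance (content : String) (out : List String) : Decidable (Spec_split_visits_py content out) := by unfold Spec_split_visits_py; infer_instance

-- ===== CLAIM (what is proved, stated in full; the proofs are below) =====
def Claim_equal_split_visits_py : Prop := ∀ (content : String), Dom_split_visits_py content → Spec_split_visits_py content (split_visits_py content)

-- ===== LEMMAS AND PROOFS =====

-- a run joined and stripped, kept only if non-empty (pvFlush [] = [] since "" joins and strips to "")
def pvFlush (c : List String) : List String :=
  if PySem.Str.strip (PySem.Str.join "\n" c) = "" then [] else [PySem.Str.strip (PySem.Str.join "\n" c)]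

-- A's segments, written as structural recursion with the pending accumulator (unfiltered)
def pvASeg (cur : List String) : List String → List String
  | [] => if cur ≠ [] then [PySem.Str.strip (PySem.Str.join "\n" cur)] else []
  | l :: ls =>
    if pvIsMarker l then
      (if cur ≠ [] then [PySem.Str.strip (PySem.Str.join "\n" cur)] else []) ++ pvASeg [] ls
    else pvASeg (cur ++ [l]) ls

theorem pvAltGo_nil : pvAltGo [] = [] := by rw [pvAltGo.eq_def]

theorem pvJoin_nil : PySem.Str.strip (PySem.Str.join "\n" ([] : List String)) = "" := by decide

theorem pvFold_eq (lines : List String) : ∀ segs cur : List String,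
    pvFinishA (lines.foldl pvStepA (segs, cur)) = segs ++ pvASeg cur lines := by
  induction lines with
  | nil => intro segs cur; by_cases h : cur = [] <;> simp [pvASeg, pvFinishA, h]
  | cons l ls ih =>
    intro segs cur
    by_cases hm : pvIsMarker l
    · by_cases hc : cur = []
      · simpa [pvASeg, pvStepA, hm, hc] using ih segs []
      · simpa [pvASeg, pvStepA, hm, hc, List.append_assoc] using
          ih (segs ++ [PySem.Str.strip (PySem.Str.join "\n" cur)]) []
    · simpa [pvASeg, pvStepA, hm] using ih segs (cur ++ [l])

theorem pvFilter_flushIf (cur : List String) :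
    List.filter (fun s => s ≠ "") (if cur ≠ [] then [PySem.Str.strip (PySem.Str.join "\n" cur)] else [])
      = pvFlush cur := by
  by_cases hc : cur = [] <;>
    by_cases he : PySem.Str.strip (PySem.Str.join "\n" cur) = "" <;>
      simp_all [pvFlush, pvJoin_nil, List.filter]

theorem pvAltGo_unfold (ls : List String) :
    pvAltGo ls = pvFlush (ls.takeWhile (fun x => !pvIsMarker x)) ++ pvAltGo (ls.dropWhile (fun x => !pvIsMarker x)) := by
  match ls with
  | [] => rw [pvAltGo.eq_def]; simp [pvFlush, pvJoin_nil, pvAltGo_nil]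
  | l :: ls' =>
    by_cases hm : pvIsMarker l
    · conv_rhs => rw [pvAltGo.eq_def]
      rw [pvAltGo.eq_def]
      simp [hm, pvFlush, pvJoin_nil]
    · conv_lhs => rw [pvAltGo.eq_def]
      simp [hm, pvFlush]

theorem pvASeg_eq (lines : List String) : ∀ cur : List String,
    List.filter (fun s => s ≠ "") (pvASeg cur lines)
      = pvFlush (cur ++ lines.takeWhile (fun x => !pvIsMarker x))
        ++ pvAltGo (lines.dropWhile (fun x => !pvIsMarker x)) := by
  induction lines with
  | nil =>
    intro cur
    rw [show pvASeg cur [] = if cur ≠ [] then [PySem.Str.strip (PySem.Str.join "\n" cur)] else [] from rfl]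
    rw [pvFilter_flushIf cur]
    simp [pvAltGo_nil]
  | cons l ls ih =>
    intro cur
    by_cases hm : pvIsMarker l
    · rw [show pvASeg cur (l :: ls)
            = (if cur ≠ [] then [PySem.Str.strip (PySem.Str.join "\n" cur)] else []) ++ pvASeg [] ls
          from by simp [pvASeg, hm]]
      rw [List.filter_append, pvFilter_flushIf cur, ih [], List.nil_append]
      rw [← pvAltGo_unfold ls]
      rw [show (l :: ls).takeWhile (fun x => !pvIsMarker x) = [] from by simp [hm]]
      rw [show (l :: ls).dropWhile (fun x => !pvIsMarker x) = l :: ls from by simp [hm]]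
      rw [show pvAltGo (l :: ls) = pvAltGo ls from by rw [pvAltGo.eq_def]; simp [hm]]
      simp
    · rw [show pvASeg cur (l :: ls) = pvASeg (cur ++ [l]) ls from by simp [pvASeg, hm]]
      rw [ih (cur ++ [l])]
      rw [show (l :: ls).takeWhile (fun x => !pvIsMarker x) = l :: ls.takeWhile (fun x => !pvIsMarker x)
          from by simp [hm]]
      rw [show (l :: ls).dropWhile (fun x => !pvIsMarker x) = ls.dropWhile (fun x => !pvIsMarker x)
          from by simp [hm]]
      simp [List.append_assoc]

-- ===== VERDICT (by name: the statement is the Claim_ definition above) =====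
theorem split_visits_py_spec : Claim_equal_split_visits_py := by
  intro content _
  unfold Spec_split_visits_py split_visits_py split_visits_py_alt
  rw [pvFold_eq (PySem.Str.splitlines content) [] [], List.nil_append,
      pvASeg_eq (PySem.Str.splitlines content) [], List.nil_append,
      ← pvAltGo_unfold (PySem.Str.splitlines content)]
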